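-- pv_equiv track=rewrite | github.com/RunnerQuan/SAFE-Agent | backend/MTAtlas/mtatlas/static_pure/normalizer.py | _infer_content_sources
-- ===== SOURCE A (Python) =====
-- def _infer_content_sources(
--
--     tool_name: str,
--     description: str,
--     side_effects: list[str],
--     source: str,
-- ) -> list[str]:
--     lowered = f"{tool_name} {description}\n{source}".lower()
--     sources: set[str] = set()
--     if "email_read" in side_effects or any(token in lowered for token in ("email", "mailbox", "inbox", "messages")):
--         sources.add("email_store")
--     if "network_read" in side_effects:
--         sources.add("web_content")
--     if "file_read" in side_effects:
--         sources.add("file_content")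
--     if "db_read" in side_effects or "db_execute" in side_effects:
--         sources.add("database_record")
--     if "index_store" in side_effects:
--         sources.add("indexed_document")
--     if "cache_store" in side_effects:
--         sources.add("cached_content")
--     return sorted(sources)
-- ===== SOURCE B (Python) =====
-- _EFFECT_TAG = {
--     "email_read": "email_store",
--     "network_read": "web_content",
--     "file_read": "file_content",
--     "db_read": "database_record",
--     "db_execute": "database_record",
--     "index_store": "indexed_document",
--     "cache_store": "cached_content",
-- }
--
-- _EMAIL_TOKENS = ("email", "mailbox", "inbox", "messages")
--
--
-- def _infer_content_sources(
--     tool_name: str,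
--     description: str,
--     side_effects: list[str],
--     source: str,
-- ) -> list[str]:
--     lowered = f"{tool_name} {description}\n{source}".lower()
--     # One pass over side_effects through an inverted lookup table, instead of
--     # scanning side_effects once per rule.
--     tags = {_EFFECT_TAG[e] for e in side_effects if e in _EFFECT_TAG}
--     if any(token in lowered for token in _EMAIL_TOKENS):
--         tags.add("email_store")
--     return sorted(tags)
-- ===== Notes on version B (the rewrite author's own statement) =====
-- stated objective: alternative
-- what changed: Inverts the traversal: instead of six branches each scanning side_effects for their keys, B makes a single pass over side_effects through an inverted side-effect->tag lookup dict, then handles the email token scan separately.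
import Mathlib
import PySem

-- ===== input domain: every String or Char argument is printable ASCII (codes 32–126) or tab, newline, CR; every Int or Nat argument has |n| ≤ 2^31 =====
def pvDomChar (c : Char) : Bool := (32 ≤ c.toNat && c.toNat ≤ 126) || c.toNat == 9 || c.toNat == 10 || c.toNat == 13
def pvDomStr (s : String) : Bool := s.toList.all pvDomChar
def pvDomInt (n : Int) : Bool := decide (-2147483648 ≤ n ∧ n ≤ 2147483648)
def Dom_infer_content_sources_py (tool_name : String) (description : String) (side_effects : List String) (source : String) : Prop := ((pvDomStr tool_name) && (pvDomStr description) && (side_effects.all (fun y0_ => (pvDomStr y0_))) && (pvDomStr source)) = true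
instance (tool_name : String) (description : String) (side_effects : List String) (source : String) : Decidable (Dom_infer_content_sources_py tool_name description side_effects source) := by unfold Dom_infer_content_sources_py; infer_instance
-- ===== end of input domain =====

-- B inverts the traversal: one pass over side_effects through a side-effect→tag lookup dict (plus the email token scan), instead of six branches each scanning side_effects; objective: alternative.


-- ===== PORT A =====
def infer_content_sources_py (tool_name : String) (description : String) (side_effects : List String) (source : String) : List String :=
  let lowered := PySem.Str.lower (tool_name ++ " " ++ description ++ "\n" ++ source)
  let sources : PySem.Set String := PySem.Set.empty
  let sources := if side_effects.contains "email_read" || ["email", "mailbox", "inbox", "messages"].any (fun token => PySem.Str.isIn token lowered) then sources.add "email_store" else sources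
  let sources := if side_effects.contains "network_read" then sources.add "web_content" else sources
  let sources := if side_effects.contains "file_read" then sources.add "file_content" else sources
  let sources := if side_effects.contains "db_read" || side_effects.contains "db_execute" then sources.add "database_record" else sources
  let sources := if side_effects.contains "index_store" then sources.add "indexed_document" else sources
  let sources := if side_effects.contains "cache_store" then sources.add "cached_content" else sources
  PySem.List.sorted sources (fun x => x) false

-- ===== PORT B =====
-- the inverted lookup table of Source B: side-effect key → tag
def pvEffectTag : PySem.Dict String String :=
  PySem.Dict.ofList
    [ ("email_read", "email_store"),
      ("network_read", "web_content"),
      ("file_read", "file_content"),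
      ("db_read", "database_record"),
      ("db_execute", "database_record"),
      ("index_store", "indexed_document"),
      ("cache_store", "cached_content") ]

def pvEmailTokens : List String := ["email", "mailbox", "inbox", "messages"]

-- the body of the set comprehension: look e up, add the tag on a hit
def pvStep (s : PySem.Set String) (e : String) : PySem.Set String :=
  match PySem.Dict.get? pvEffectTag e with
  | some t => PySem.Set.add s t
  | none => s

def infer_content_sources_py_alt (tool_name : String) (description : String) (side_effects : List String) (source : String) : List String :=
  let lowered := PySem.Str.lower (tool_name ++ " " ++ description ++ "\n" ++ source)
  -- {_EFFECT_TAG[e] for e in side_effects if e in _EFFECT_TAG}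
  let tags : PySem.Set String := side_effects.foldl pvStep PySem.Set.empty
  let tags := if pvEmailTokens.any (fun token => PySem.Str.isIn token lowered) then tags.add "email_store" else tags
  PySem.List.sorted tags (fun x => x) false

-- ===== PRECONDITION & SPEC =====
def Spec_infer_content_sources_py (tool_name : String) (description : String) (side_effects : List String) (source : String) (out : List String) : Prop := out = infer_content_sources_py_alt tool_name description side_effects source
instance (tool_name : String) (description : String) (side_effects : List String) (source : String) (out : List String) : Decidable (Spec_infer_content_sources_py tool_name description side_effects source out) := by unfold Spec_infer_content_sources_py; infer_instance

-- ===== CLAIM (what is proved, stated in full; the proofs are below) =====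
def Claim_equal_infer_content_sources_py : Prop := ∀ (tool_name : String) (description : String) (side_effects : List String) (source : String), Dom_infer_content_sources_py tool_name description side_effects source → Spec_infer_content_sources_py tool_name description side_effects source (infer_content_sources_py tool_name description side_effects source)

-- ===== LEMMAS AND PROOFS =====

-- membership through a conditional Set.add
theorem pv_nodup_add (s : PySem.Set String) (x : String) (hs : s.Nodup) :
    (s.add x).Nodup := by
  rw [PySem.Set.add_eq_ite]
  split_ifs with h
  · exact hs
  · exact List.Nodup.append hs (List.nodup_singleton x)
      (by intro a ha hb; simp only [List.mem_singleton] at hb; subst hb; exact h ha)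

theorem pv_mem_ite_add (s : PySem.Set String) (c : Prop) [Decidable c] (x y : String) :
    (y ∈ (if c then PySem.Set.add s x else s)) ↔ ((c ∧ y = x) ∨ y ∈ s) := by
  split_ifs with h <;> simp [PySem.Set.mem_add] <;> tauto

theorem pv_nodup_ite_add (s : PySem.Set String) (c : Prop) [Decidable c] (x : String)
    (hs : s.Nodup) : (if c then PySem.Set.add s x else s).Nodup := by
  split_ifs
  · exact pv_nodup_add s x hs
  · exact hs

theorem pv_mem_fold (l : List String) (s : PySem.Set String) (y : String) :
    (y ∈ l.foldl pvStep s) ↔ (y ∈ s ∨ ∃ e ∈ l, PySem.Dict.get? pvEffectTag e = some y) := by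
  induction l generalizing s with
  | nil => simp
  | cons a t ih =>
      simp only [List.foldl_cons, ih, List.mem_cons]
      unfold pvStep
      cases h : PySem.Dict.get? pvEffectTag a
      all_goals simp [PySem.Set.mem_add, h]
      all_goals aesop

theorem pv_nodup_fold (l : List String) (s : PySem.Set String) (hs : s.Nodup) :
    (l.foldl pvStep s).Nodup := by
  induction l generalizing s with
  | nil => exact hs
  | cons a t ih =>
      simp only [List.foldl_cons]
      apply ih
      unfold pvStep
      cases PySem.Dict.get? pvEffectTag a
      · exact hs
      · exact pv_nodup_add _ _ hs

-- the lookup table characterised pointwise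
theorem pv_effTag_char (e y : String) :
    PySem.Dict.get? pvEffectTag e = some y ↔
      ((e = "email_read" ∧ y = "email_store") ∨
       (e = "network_read" ∧ y = "web_content") ∨
       (e = "file_read" ∧ y = "file_content") ∨
       (e = "db_read" ∧ y = "database_record") ∨
       (e = "db_execute" ∧ y = "database_record") ∨
       (e = "index_store" ∧ y = "indexed_document") ∨
       (e = "cache_store" ∧ y = "cached_content")) := by
  rw [PySem.Dict.get?_eq_some_iff_mem_items _ _ _ (by decide)]
  rw [show pvEffectTag.items =
      [ ("email_read", "email_store"), ("network_read", "web_content"), ("file_read", "file_content"),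
        ("db_read", "database_record"), ("db_execute", "database_record"), ("index_store", "indexed_document"),
        ("cache_store", "cached_content") ] from rfl]
  simp [Prod.ext_iff]

theorem pv_exists_lookup (side_effects : List String) (y : String) :
    (∃ e ∈ side_effects, PySem.Dict.get? pvEffectTag e = some y) ↔
      (("email_read" ∈ side_effects ∧ y = "email_store") ∨
       ("network_read" ∈ side_effects ∧ y = "web_content") ∨
       ("file_read" ∈ side_effects ∧ y = "file_content") ∨
       ("db_read" ∈ side_effects ∧ y = "database_record") ∨
       ("db_execute" ∈ side_effects ∧ y = "database_record") ∨
       ("index_store" ∈ side_effects ∧ y = "indexed_document") ∨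
       ("cache_store" ∈ side_effects ∧ y = "cached_content")) := by
  constructor
  · rintro ⟨e, he, hl⟩
    rcases (pv_effTag_char e y).1 hl with ⟨rfl, rfl⟩|⟨rfl, rfl⟩|⟨rfl, rfl⟩|⟨rfl, rfl⟩|⟨rfl, rfl⟩|⟨rfl, rfl⟩|⟨rfl, rfl⟩ <;> tauto
  · rintro (⟨h, rfl⟩|⟨h, rfl⟩|⟨h, rfl⟩|⟨h, rfl⟩|⟨h, rfl⟩|⟨h, rfl⟩|⟨h, rfl⟩) <;>
      exact ⟨_, h, by rw [pv_effTag_char]; tauto⟩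

-- ===== VERDICT (by name: the statement is the Claim_ definition above) =====
set_option maxHeartbeats 1000000 in
theorem infer_content_sources_py_spec : Claim_equal_infer_content_sources_py := by
  intro tool_name description side_effects source _
  unfold Spec_infer_content_sources_py infer_content_sources_py infer_content_sources_py_alt
  apply PySem.List.sorted_eq_sorted_of_perm _ _ _ (fun a b h => h)
  rw [List.perm_ext_iff_of_nodup]
  · intro y
    simp only [pv_mem_ite_add, pv_mem_fold, pv_exists_lookup, PySem.Set.empty, List.not_mem_nil,
      List.contains_iff_mem, List.any_eq_true, Bool.or_eq_true, pvEmailTokens, List.mem_cons, or_false, false_or]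
    generalize (∃ x, (x = "email" ∨ x = "mailbox" ∨ x = "inbox" ∨ x = "messages") ∧
        PySem.Str.isIn x (PySem.Str.lower (tool_name ++ " " ++ description ++ "\n" ++ source)) = true) = T
    generalize ("cache_store" ∈ side_effects) = C1
    generalize ("index_store" ∈ side_effects) = C2
    generalize ("db_read" ∈ side_effects) = C3
    generalize ("db_execute" ∈ side_effects) = C4
    generalize ("file_read" ∈ side_effects) = C5
    generalize ("network_read" ∈ side_effects) = C6
    generalize ("email_read" ∈ side_effects) = C7
    generalize (y = "cached_content") = E1
    generalize (y = "indexed_document") = E2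
    generalize (y = "database_record") = E3
    generalize (y = "file_content") = E4
    generalize (y = "web_content") = E5
    generalize (y = "email_store") = E6
    tauto
  · exact pv_nodup_ite_add _ _ _ (pv_nodup_ite_add _ _ _ (pv_nodup_ite_add _ _ _
      (pv_nodup_ite_add _ _ _ (pv_nodup_ite_add _ _ _ (pv_nodup_ite_add _ _ _ List.nodup_nil)))))
  · exact pv_nodup_ite_add _ _ _ (pv_nodup_fold _ _ List.nodup_nil)
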